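-- pv_equiv track=rewrite | github.com/efekaraduman/Prompt-Sentinel | app/guard.py | generate_structured_suggestions
-- ===== SOURCE A (Python) =====
-- _STRUCTURED_SUGGESTION_MAP: dict[str, dict[str, str]] = {
--     "prompt_injection": {
--         "title":          "Harden system prompt boundaries",
--         "recommendation": "Separate system instructions from user content and reject override phrases.",
--         "priority":       "high",
--     },
--     "pii": {
--         "title":          "Add output redaction",
--         "recommendation": "Apply secret/PII redaction middleware before returning model output.",
--         "priority":       "high",
--     },
--     "hallucination": {
--         "title":          "Improve grounding",
--         "recommendation": "Require retrieval-backed answers and citation enforcement for high-risk flows.",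
--         "priority":       "medium",
--     },
--     "rag_injection": {
--         "title":          "Sanitize retrieved documents",
--         "recommendation": "Filter or score retrieved docs before passing them into the prompt.",
--         "priority":       "high",
--     },
--     "tool_abuse": {
--         "title":          "Restrict tool execution",
--         "recommendation": "Use tool allowlists and strict argument schema validation.",
--         "priority":       "high",
--     },
--     "override": {
--         "title":          "Enforce instruction hierarchy",
--         "recommendation": "Reject attempts to redefine system or developer instructions.",
--         "priority":       "high",
--     },
--     "policy_leakage": {
--         "title":          "Protect system prompt confidentiality",
--         "recommendation": "Block responses that echo or reconstruct protected system instructions.",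
--         "priority":       "high",
--     },
--     "rag_poisoning": {
--         "title":          "Sanitize retrieved documents",
--         "recommendation": "Filter or score retrieved docs before passing them into the prompt.",
--         "priority":       "high",
--     },
--     "usage_limit": {                                                # PHASE 2.12
--         "title":          "Review quota and upgrade plan",
--         "recommendation": "Current usage is approaching or has hit plan limits; upgrade or schedule quota increases.",
--         "priority":       "low",
--     },
-- }
--
-- def generate_structured_suggestions(categories: list[str]) -> list[dict[str, str]]:
--     """Return structured hardening recommendations for detected categories (PHASE 2.2).
--
--     One entry per matched category, ordered by priority (high → medium → low),
--     deduplicated on title so alias categories (rag_injection / rag_poisoning) collapse.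
--     """
--     _PRIORITY_ORDER = {"high": 0, "medium": 1, "low": 2}
--     seen_titles: set[str] = set()
--     results: list[dict[str, str]] = []
--     for cat in categories:
--         entry = _STRUCTURED_SUGGESTION_MAP.get(cat)
--         if entry and entry["title"] not in seen_titles:
--             seen_titles.add(entry["title"])
--             results.append({"category": cat, **entry})
--     results.sort(key=lambda x: _PRIORITY_ORDER.get(x["priority"], 9))
--     return results
-- ===== SOURCE B (Python) =====
-- _STRUCTURED_SUGGESTION_MAP: dict[str, dict[str, str]] = {
--     "prompt_injection": {
--         "title":          "Harden system prompt boundaries",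
--         "recommendation": "Separate system instructions from user content and reject override phrases.",
--         "priority":       "high",
--     },
--     "pii": {
--         "title":          "Add output redaction",
--         "recommendation": "Apply secret/PII redaction middleware before returning model output.",
--         "priority":       "high",
--     },
--     "hallucination": {
--         "title":          "Improve grounding",
--         "recommendation": "Require retrieval-backed answers and citation enforcement for high-risk flows.",
--         "priority":       "medium",
--     },
--     "rag_injection": {
--         "title":          "Sanitize retrieved documents",
--         "recommendation": "Filter or score retrieved docs before passing them into the prompt.",
--         "priority":       "high",
--     },
--     "tool_abuse": {
--         "title":          "Restrict tool execution",
--         "recommendation": "Use tool allowlists and strict argument schema validation.",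
--         "priority":       "high",
--     },
--     "override": {
--         "title":          "Enforce instruction hierarchy",
--         "recommendation": "Reject attempts to redefine system or developer instructions.",
--         "priority":       "high",
--     },
--     "policy_leakage": {
--         "title":          "Protect system prompt confidentiality",
--         "recommendation": "Block responses that echo or reconstruct protected system instructions.",
--         "priority":       "high",
--     },
--     "rag_poisoning": {
--         "title":          "Sanitize retrieved documents",
--         "recommendation": "Filter or score retrieved docs before passing them into the prompt.",
--         "priority":       "high",
--     },
--     "usage_limit": {
--         "title":          "Review quota and upgrade plan",
--         "recommendation": "Current usage is approaching or has hit plan limits; upgrade or schedule quota increases.",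
--         "priority":       "low",
--     },
-- }
--
--
-- def generate_structured_suggestions(categories: list[str]) -> list[dict[str, str]]:
--     """Priority bucketing instead of a comparison sort: one pass appends each
--     matched, not-yet-seen entry to its priority's bucket; the answer is the
--     buckets concatenated high -> medium -> low."""
--     buckets = {"high": [], "medium": [], "low": []}
--     seen_titles: set[str] = set()
--     for cat in categories:
--         entry = _STRUCTURED_SUGGESTION_MAP.get(cat)
--         if entry and entry["title"] not in seen_titles:
--             seen_titles.add(entry["title"])
--             buckets[entry["priority"]].append({"category": cat, **entry})
--     return buckets["high"] + buckets["medium"] + buckets["low"]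
-- ===== Notes on version B (the rewrite author's own statement) =====
-- stated objective: alternative
-- what changed: Replaces A's collect-then-stable-sort-by-priority with a single pass that appends each matched, unseen entry directly into one of three priority buckets (high/medium/low) and returns their concatenation, eliminating the comparison sort.
import Mathlib
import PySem

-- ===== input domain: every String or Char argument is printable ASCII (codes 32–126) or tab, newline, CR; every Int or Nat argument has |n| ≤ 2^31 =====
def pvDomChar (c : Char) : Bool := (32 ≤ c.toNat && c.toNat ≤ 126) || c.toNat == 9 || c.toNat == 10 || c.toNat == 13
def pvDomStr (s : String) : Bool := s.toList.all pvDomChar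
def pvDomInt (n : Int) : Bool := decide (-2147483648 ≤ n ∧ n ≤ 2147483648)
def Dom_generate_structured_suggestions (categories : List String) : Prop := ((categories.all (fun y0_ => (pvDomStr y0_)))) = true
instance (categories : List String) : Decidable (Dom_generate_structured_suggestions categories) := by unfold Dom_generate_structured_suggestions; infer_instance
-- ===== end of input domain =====

-- B replaces A's collect-then-stable-sort by one pass into three priority buckets
-- concatenated high ++ medium ++ low (objective: alternative decomposition, same cost).

-- ===== PORT A =====
-- the module-level _STRUCTURED_SUGGESTION_MAP (entry dicts kept as their item lists)
def pvMap : PySem.Dict String (List (String × String)) := PySem.Dict.mk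
  [ ("prompt_injection",
      [("title", "Harden system prompt boundaries"),
       ("recommendation", "Separate system instructions from user content and reject override phrases."),
       ("priority", "high")]),
    ("pii",
      [("title", "Add output redaction"),
       ("recommendation", "Apply secret/PII redaction middleware before returning model output."),
       ("priority", "high")]),
    ("hallucination",
      [("title", "Improve grounding"),
       ("recommendation", "Require retrieval-backed answers and citation enforcement for high-risk flows."),
       ("priority", "medium")]),
    ("rag_injection",
      [("title", "Sanitize retrieved documents"),
       ("recommendation", "Filter or score retrieved docs before passing them into the prompt."),
       ("priority", "high")]),
    ("tool_abuse",
      [("title", "Restrict tool execution"),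
       ("recommendation", "Use tool allowlists and strict argument schema validation."),
       ("priority", "high")]),
    ("override",
      [("title", "Enforce instruction hierarchy"),
       ("recommendation", "Reject attempts to redefine system or developer instructions."),
       ("priority", "high")]),
    ("policy_leakage",
      [("title", "Protect system prompt confidentiality"),
       ("recommendation", "Block responses that echo or reconstruct protected system instructions."),
       ("priority", "high")]),
    ("rag_poisoning",
      [("title", "Sanitize retrieved documents"),
       ("recommendation", "Filter or score retrieved docs before passing them into the prompt."),
       ("priority", "high")]),
    ("usage_limit",
      [("title", "Review quota and upgrade plan"),
       ("recommendation", "Current usage is approaching or has hit plan limits; upgrade or schedule quota increases."),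
       ("priority", "low")]) ]

-- _PRIORITY_ORDER = {"high": 0, "medium": 1, "low": 2}
def pvPrio : PySem.Dict String Int := PySem.Dict.mk [("high", 0), ("medium", 1), ("low", 2)]

-- A's sort key: lambda x: _PRIORITY_ORDER.get(x["priority"], 9)
def pvRank (x : List (String × String)) : Int :=
  PySem.Dict.getD pvPrio (PySem.Dict.getD (PySem.Dict.mk x) "priority" "") 9

-- A's loop body: entry = map.get(cat); if entry and title not seen: add, append row
def pvStepA (st : PySem.Set String × List (List (String × String))) (cat : String) :
    PySem.Set String × List (List (String × String)) :=
  match PySem.Dict.get? pvMap cat with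
  | none => st
  | some e =>
      let t := PySem.Dict.getD (PySem.Dict.mk e) "title" ""
      if PySem.Set.contains st.1 t then st
      else (PySem.Set.add st.1 t, st.2 ++ [("category", cat) :: e])

def generate_structured_suggestions (categories : List String) : List (List (String × String)) :=
  PySem.List.sorted (categories.foldl pvStepA (PySem.Set.empty, [])).2 pvRank

-- ===== PORT B =====
-- B's loop body: append the row to the bucket named by entry["priority"]
def pvStepB
    (st : PySem.Set String × List (List (String × String)) × List (List (String × String)) ×
          List (List (String × String))) (cat : String) :
    PySem.Set String × List (List (String × String)) × List (List (String × String)) ×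
          List (List (String × String)) :=
  match PySem.Dict.get? pvMap cat with
  | none => st
  | some e =>
      let t := PySem.Dict.getD (PySem.Dict.mk e) "title" ""
      if PySem.Set.contains st.1 t then st
      else
        let row := ("category", cat) :: e
        let p := PySem.Dict.getD (PySem.Dict.mk e) "priority" ""
        if p == "high" then (PySem.Set.add st.1 t, st.2.1 ++ [row], st.2.2.1, st.2.2.2)
        else if p == "medium" then (PySem.Set.add st.1 t, st.2.1, st.2.2.1 ++ [row], st.2.2.2)
        else (PySem.Set.add st.1 t, st.2.1, st.2.2.1, st.2.2.2 ++ [row])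

def generate_structured_suggestions_alt (categories : List String) :
    List (List (String × String)) :=
  let st := categories.foldl pvStepB (PySem.Set.empty, [], [], [])
  st.2.1 ++ st.2.2.1 ++ st.2.2.2

-- ===== PRECONDITION & SPEC =====
def Spec_generate_structured_suggestions (categories : List String) (out : List (List (String × String))) : Prop := out = generate_structured_suggestions_alt categories
instance (categories : List String) (out : List (List (String × String))) : Decidable (Spec_generate_structured_suggestions categories out) := by unfold Spec_generate_structured_suggestions; infer_instance

-- ===== CLAIM (what is proved, stated in full; the proofs are below) =====
def Claim_equal_generate_structured_suggestions : Prop := ∀ (categories : List String), Dom_generate_structured_suggestions categories → Spec_generate_structured_suggestions categories (generate_structured_suggestions categories)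

-- ===== LEMMAS AND PROOFS =====

-- the list of rows the dedup loop emits, starting from a given seen-set
def pvRows (seen : PySem.Set String) : List String → List (List (String × String))
  | [] => []
  | c :: cs =>
      match PySem.Dict.get? pvMap c with
      | none => pvRows seen cs
      | some e =>
          let t := PySem.Dict.getD (PySem.Dict.mk e) "title" ""
          if PySem.Set.contains seen t then pvRows seen cs
          else (("category", c) :: e) :: pvRows (PySem.Set.add seen t) cs

-- the seen-set after the loop
def pvSeenF (seen : PySem.Set String) : List String → PySem.Set String
  | [] => seen
  | c :: cs =>
      match PySem.Dict.get? pvMap c with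
      | none => pvSeenF seen cs
      | some e =>
          let t := PySem.Dict.getD (PySem.Dict.mk e) "title" ""
          if PySem.Set.contains seen t then pvSeenF seen cs
          else pvSeenF (PySem.Set.add seen t) cs

-- the priority string of a row emitted by either loop
def pvPrioOf (r : List (String × String)) : String :=
  PySem.Dict.getD (PySem.Dict.mk r) "priority" ""

lemma foldlA_eq (cs : List String) : ∀ (seen : PySem.Set String)
    (R : List (List (String × String))),
    cs.foldl pvStepA (seen, R) = (pvSeenF seen cs, R ++ pvRows seen cs) := by
  induction cs with
  | nil => intro seen R; simp [pvSeenF, pvRows]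
  | cons c cs ih =>
      intro seen R
      simp only [List.foldl_cons, pvStepA, pvSeenF, pvRows]
      cases h : PySem.Dict.get? pvMap c with
      | none => simp [ih]
      | some e =>
          simp only []
          by_cases hc : PySem.Dict.getD (PySem.Dict.mk e) "title" "" ∈ seen
          · simp [hc, ih]
          · simp [hc, ih]

lemma foldlB_eq (cs : List String) : ∀ (seen : PySem.Set String)
    (H M L : List (List (String × String))),
    cs.foldl pvStepB (seen, H, M, L) =
      (pvSeenF seen cs,
       H ++ (pvRows seen cs).filter (fun r => pvPrioOf r == "high"),
       M ++ (pvRows seen cs).filter (fun r => pvPrioOf r == "medium"),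
       L ++ (pvRows seen cs).filter (fun r => !(pvPrioOf r == "high") && !(pvPrioOf r == "medium"))) := by
  induction cs with
  | nil => intro seen H M L; simp [pvSeenF, pvRows]
  | cons c cs ih =>
      intro seen H M L
      simp only [List.foldl_cons, pvStepB, pvSeenF, pvRows]
      cases h : PySem.Dict.get? pvMap c with
      | none => simp [ih]
      | some e =>
          simp only []
          by_cases hc : PySem.Dict.getD (PySem.Dict.mk e) "title" "" ∈ seen
          · simp [hc, ih]
          · have hp : pvPrioOf (("category", c) :: e) = PySem.Dict.getD (PySem.Dict.mk e) "priority" "" := by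
              simp [pvPrioOf, PySem.Dict.getD, PySem.Dict.get?_mk_cons]
            by_cases h1 : PySem.Dict.getD (PySem.Dict.mk e) "priority" "" = "high"
            · simp [hc, h1, ih, hp]
            · have h1' : (PySem.Dict.getD (PySem.Dict.mk e) "priority" "" == "high") = false := by
                simpa using h1
              by_cases h2 : PySem.Dict.getD (PySem.Dict.mk e) "priority" "" = "medium"
              · simp [hc, h2, ih, hp]
              · have h2' : (PySem.Dict.getD (PySem.Dict.mk e) "priority" "" == "medium") = false := by
                  simpa using h2
                simp [hc, h1', h2', ih, hp]

-- every entry the map yields carries one of the three priorities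
lemma pvMap_prio (c : String) (e : List (String × String))
    (h : PySem.Dict.get? pvMap c = some e) :
    PySem.Dict.getD (PySem.Dict.mk e) "priority" "" = "high" ∨
    PySem.Dict.getD (PySem.Dict.mk e) "priority" "" = "medium" ∨
    PySem.Dict.getD (PySem.Dict.mk e) "priority" "" = "low" := by
  rcases Option.map_eq_some_iff.mp h with ⟨⟨k, v⟩, hf, rfl⟩
  have hmem := List.mem_of_find?_eq_some hf
  simp only [pvMap, List.mem_cons, List.not_mem_nil, or_false, Prod.mk.injEq] at hmem
  rcases hmem with ⟨-, rfl⟩ | ⟨-, rfl⟩ | ⟨-, rfl⟩ | ⟨-, rfl⟩ | ⟨-, rfl⟩ | ⟨-, rfl⟩ | ⟨-, rfl⟩ |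
    ⟨-, rfl⟩ | ⟨-, rfl⟩ <;>
    simp [PySem.Dict.getD, PySem.Dict.get?_mk_cons]

-- every row either loop emits comes from the map
lemma pvRows_shape (seen : PySem.Set String) (cs : List String) :
    ∀ r ∈ pvRows seen cs, ∃ c e, PySem.Dict.get? pvMap c = some e ∧ r = ("category", c) :: e := by
  induction cs generalizing seen with
  | nil => simp [pvRows]
  | cons c cs ih =>
      intro r hr
      cases h : PySem.Dict.get? pvMap c with
      | none =>
          simp only [pvRows, h] at hr
          exact ih seen r hr
      | some e =>
          simp only [pvRows, h] at hr
          by_cases hcond : PySem.Set.contains seen (PySem.Dict.getD (PySem.Dict.mk e) "title" "") = true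
          · rw [if_pos hcond] at hr
            exact ih seen r hr
          · rw [if_neg hcond] at hr
            rw [List.mem_cons] at hr
            rcases hr with hr | hr
            · exact ⟨c, e, h, hr⟩
            · exact ih _ r hr

-- insertBy passes over a prefix it does not go before
lemma insertBy_skip {α : Type} (before : α → α → Bool) (x : α) (A R : List α)
    (h : ∀ a ∈ A, before x a = false) :
    PySem.List.insertBy before x (A ++ R) = A ++ PySem.List.insertBy before x R := by
  induction A with
  | nil => simp
  | cons a as ih =>
      have ha : before x a = false := h a (by simp)
      simp only [List.cons_append, PySem.List.insertBy, ha]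
      simp only [Bool.false_eq_true, if_false]
      rw [ih (fun b hb => h b (by simp [hb]))]

-- insertBy prepends when it goes before everything
lemma insertBy_front {α : Type} (before : α → α → Bool) (x : α) (R : List α)
    (h : ∀ r ∈ R, before x r = true) :
    PySem.List.insertBy before x R = x :: R := by
  cases R with
  | nil => rfl
  | cons r rs => simp [PySem.List.insertBy, h r (by simp)]

-- a stable sort whose keys all lie in {0,1,2} is bucketing by key
lemma sorted_three {α : Type} (key : α → Int) (xs : List α)
    (h : ∀ x ∈ xs, key x = 0 ∨ key x = 1 ∨ key x = 2) :
    PySem.List.sorted xs key =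
      xs.filter (fun r => key r == 0) ++ xs.filter (fun r => key r == 1) ++
      xs.filter (fun r => key r == 2) := by
  induction xs using List.reverseRecOn with
  | nil => rfl
  | append_singleton xs x ih =>
      have hx := h x (by simp)
      have hxs : ∀ y ∈ xs, key y = 0 ∨ key y = 1 ∨ key y = 2 :=
        fun y hy => h y (by simp [hy])
      rw [PySem.List.sorted_eq_foldl_insertBy, List.foldl_append, List.foldl_cons,
        List.foldl_nil, ← PySem.List.sorted_eq_foldl_insertBy, ih hxs]
      rcases hx with hx | hx | hx
      · rw [List.append_assoc]
        rw [insertBy_skip _ _ (xs.filter (fun r => key r == 0))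
            (List.filter (fun r => key r == 1) xs ++ List.filter (fun r => key r == 2) xs)
            (by intro a ha; simp at ha; simp [hx, ha.2])]
        rw [insertBy_front _ _ _
            (by intro a ha; simp at ha; rcases ha with ⟨_, h1⟩ | ⟨_, h2⟩ <;> simp [hx] <;> omega)]
        simp [List.filter_append, hx]
      · rw [insertBy_skip _ _ _ _
            (by intro a ha; simp at ha; rcases ha with ⟨_, h1⟩ | ⟨_, h2⟩ <;> simp [hx] <;> omega)]
        rw [insertBy_front _ _ _
            (by intro a ha; simp at ha; simp [hx, ha.2])]
        simp [List.filter_append, hx]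
        
      · rw [PySem.List.insertBy_of_forall_not_before _ _ _
            (by intro a ha; simp at ha;
                rcases ha with (⟨_, h1⟩ | ⟨_, h2⟩) | ⟨_, h3⟩ <;> simp [hx] <;> omega)]
        simp [List.filter_append, hx]

-- on emitted rows, rank-buckets are exactly priority-string buckets
lemma rank_of_prio (r : List (String × String)) (c : String) (e : List (String × String))
    (hr : r = ("category", c) :: e) :
    pvRank r = PySem.Dict.getD pvPrio (PySem.Dict.getD (PySem.Dict.mk e) "priority" "") 9 ∧
    pvPrioOf r = PySem.Dict.getD (PySem.Dict.mk e) "priority" "" := by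
  subst hr
  constructor <;> simp [pvRank, pvPrioOf, PySem.Dict.getD, PySem.Dict.get?_mk_cons]

-- ===== VERDICT (by name: the statement is the Claim_ definition above) =====
theorem generate_structured_suggestions_spec : Claim_equal_generate_structured_suggestions := by
  intro categories _
  unfold Spec_generate_structured_suggestions
  unfold generate_structured_suggestions generate_structured_suggestions_alt
  rw [foldlA_eq, foldlB_eq]
  dsimp only
  rw [List.nil_append, List.nil_append, List.nil_append, List.nil_append]
  set rows := pvRows PySem.Set.empty categories with hrows
  have hshape := pvRows_shape PySem.Set.empty categories
  have hmem : ∀ r ∈ rows, pvRank r = 0 ∨ pvRank r = 1 ∨ pvRank r = 2 := by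
    intro r hr
    obtain ⟨c, e, hce, hre⟩ := hshape r hr
    obtain ⟨h1, _⟩ := rank_of_prio r c e hre
    rcases pvMap_prio c e hce with hp | hp | hp <;> rw [h1, hp] <;> simp [pvPrio, PySem.Dict.getD, PySem.Dict.get?_mk_cons]
  rw [sorted_three pvRank rows hmem]
  have hcong : ∀ (s : String) (k : Int),
      (∀ r' ∈ rows, (pvRank r' = k) = (pvPrioOf r' = s)) →
      rows.filter (fun r => pvRank r == k) = rows.filter (fun r => pvPrioOf r == s) := by
    intro s k hk
    apply List.filter_congr
    intro r hr
    by_cases hh : pvRank r = k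
    · have hs : pvPrioOf r = s := by rw [← hk r hr]; exact hh
      simp [hh, hs]
    · have hs : ¬ pvPrioOf r = s := by rw [← hk r hr]; exact hh
      simp [hh, hs]
  have key_prio : ∀ r ∈ rows,
      (pvRank r = 0) = (pvPrioOf r = "high") ∧ (pvRank r = 1) = (pvPrioOf r = "medium") ∧
      (pvRank r = 2) = (pvPrioOf r = "low") := by
    intro r hr
    obtain ⟨c, e, hce, hre⟩ := hshape r hr
    obtain ⟨h1, h2⟩ := rank_of_prio r c e hre
    rcases pvMap_prio c e hce with hp | hp | hp <;>
      rw [h1, h2, hp] <;> refine ⟨?_, ?_, ?_⟩ <;> simp [pvPrio, PySem.Dict.getD, PySem.Dict.get?_mk_cons]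
  have e0 := hcong "high" 0 (fun r hr => (key_prio r hr).1)
  have e1 := hcong "medium" 1 (fun r hr => (key_prio r hr).2.1)
  have hlow : rows.filter (fun r => pvRank r == 2) =
      rows.filter (fun r => !(pvPrioOf r == "high") && !(pvPrioOf r == "medium")) := by
    apply List.filter_congr
    intro r hr
    obtain ⟨c, e, hce, hre⟩ := hshape r hr
    obtain ⟨h1, h2⟩ := rank_of_prio r c e hre
    rcases pvMap_prio c e hce with hp | hp | hp <;>
      rw [h1, h2, hp] <;> simp [pvPrio, PySem.Dict.getD, PySem.Dict.get?_mk_cons]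
  rw [e0, e1, hlow]
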